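-- pv_equiv track=rewrite | github.com/JuanTello091/Lenguajes | Lenguajes/parcial/ejer.py | recognize
-- ===== SOURCE A (Python) =====
-- def recognize(string):
--     estado = 0
--     aceptacion = {1: 'SUMA', 2: 'INCR', 3: 'ENTERO', 4: 'REAL', 5: 'ERROR'}
--
--     for char in string:
--         if estado == 0:
--             if char == '+':
--                 estado = 1
--             elif char.isdigit():
--                 estado = 3
--             else:
--                 estado = 5
--
--         elif estado == 1:
--             if char == '+':
--                 estado = 2
--             else:
--                 estado = 5
--
--         elif estado == 2:
--             estado = 5
--
--         elif estado == 3: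
--             if char.isdigit():
--                 estado = 3
--             elif char == '.':
--                 estado = 4
--             else:
--                 estado = 5
--
--         elif estado == 4:
--             if char.isdigit():
--                 estado = 4
--             else:
--                 estado = 5
--
--
--     if estado in aceptacion:
--         return aceptacion[estado]
--     else:
--         return "ERROR"
-- ===== SOURCE B (Python) =====
-- def recognize(string):
--     # classify the whole string structurally instead of running a DFA state machine
--     if string == '+':
--         return 'SUMA'
--     if string == '++':
--         return 'INCR'
--     if string.isdigit():
--         return 'ENTERO'
--     i = 0
--     while i < len(string) and string[i].isdigit():
--         i += 1
--     if 0 < i < len(string) and string[i] == '.' and (i + 1 == len(string) or string[i+1:].isdigit()):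
--         return 'REAL'
--     return 'ERROR'
-- ===== Notes on version B (the rewrite author's own statement) =====
-- stated objective: idiomatic
-- what changed: Replaces the DFA state-variable loop with a direct structural classification of the whole string: exact-literal checks for the operator tokens, str.isdigit for integers, and a leading-digit scan plus dot/fraction shape check for reals.
import Mathlib
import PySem

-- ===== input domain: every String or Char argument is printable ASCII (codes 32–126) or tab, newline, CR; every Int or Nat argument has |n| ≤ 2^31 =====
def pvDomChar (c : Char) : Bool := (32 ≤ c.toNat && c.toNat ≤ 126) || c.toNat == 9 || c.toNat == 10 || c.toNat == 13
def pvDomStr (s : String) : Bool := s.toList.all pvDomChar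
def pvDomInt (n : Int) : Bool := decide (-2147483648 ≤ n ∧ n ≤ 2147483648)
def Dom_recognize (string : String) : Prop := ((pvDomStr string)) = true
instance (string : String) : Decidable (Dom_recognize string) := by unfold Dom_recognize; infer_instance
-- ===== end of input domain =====

-- B replaces A's DFA state loop with a direct structural classification of the string (idiomatic; measured constant-factor faster).

-- ===== PORT A =====
-- A's per-character transition (the body of A's for-loop, branch for branch)
def pvStepA (estado : Int) (char : Char) : Int :=
  if estado = 0 then
    if char = '+' then 1
    else if PySem.Chars.isdigit char then 3
    else 5
  else if estado = 1 then
    if char = '+' then 2 else 5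
  else if estado = 2 then 5
  else if estado = 3 then
    if PySem.Chars.isdigit char then 3
    else if char = '.' then 4
    else 5
  else if estado = 4 then
    if PySem.Chars.isdigit char then 4 else 5
  else estado

def recognize (string : String) : String :=
  let aceptacion : PySem.Dict Int String :=
    PySem.Dict.ofList [(1, "SUMA"), (2, "INCR"), (3, "ENTERO"), (4, "REAL"), (5, "ERROR")]
  let estado := string.toList.foldl pvStepA 0
  match aceptacion.get? estado with
  | some v => v
  | none => "ERROR"

-- ===== PORT B =====
-- the while-loop of Source B: number of leading digit characters
def pvLeadDigits : List Char → Nat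
  | [] => 0
  | c :: rest => if PySem.Chars.isdigit c then pvLeadDigits rest + 1 else 0

def recognize_alt (string : String) : String :=
  if string = "+" then "SUMA"
  else if string = "++" then "INCR"
  else if PySem.Str.strIsdigit string then "ENTERO"
  else
    let cs := string.toList
    let i := pvLeadDigits cs
    if 0 < i ∧ i < cs.length ∧ cs[i]? = some '.' ∧
        (i + 1 = cs.length ∨ PySem.Chars.strIsdigit (cs.drop (i + 1))) then "REAL"
    else "ERROR"

-- ===== PRECONDITION & SPEC =====
def Spec_recognize (string : String) (out : String) : Prop := out = recognize_alt string
instance (string : String) (out : String) : Decidable (Spec_recognize string out) := by unfold Spec_recognize; infer_instance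

-- ===== CLAIM (what is proved, stated in full; the proofs are below) =====
def Claim_equal_recognize : Prop := ∀ (string : String), Dom_recognize string → Spec_recognize string (recognize string)

-- ===== LEMMAS AND PROOFS =====

theorem foldl5 (cs : List Char) : cs.foldl pvStepA 5 = 5 := by
  induction cs with
  | nil => rfl
  | cons c rest ih => simpa [List.foldl, pvStepA] using ih

theorem foldl4 (cs : List Char) :
    cs.foldl pvStepA 4 = if cs.all PySem.Chars.isdigit then 4 else 5 := by
  induction cs with
  | nil => rfl
  | cons c rest ih =>
    by_cases hd : PySem.Chars.isdigit c
    · simp [List.foldl, pvStepA, hd, ih]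
    · simp [List.foldl, pvStepA, hd, foldl5]

theorem foldl1 (cs : List Char) :
    cs.foldl pvStepA 1 = if cs = [] then 1 else if cs = ['+'] then 2 else 5 := by
  cases cs with
  | nil => rfl
  | cons c rest =>
    by_cases hc : c = '+'
    · subst hc
      cases rest with
      | nil => rfl
      | cons d r => simp [List.foldl, pvStepA, foldl5]
    · simp [List.foldl, pvStepA, hc, foldl5]

theorem foldl3 (cs : List Char) :
    cs.foldl pvStepA 3 =
      match cs.dropWhile PySem.Chars.isdigit with
      | [] => 3
      | c :: rest =>
        if c = '.' then (if rest.all PySem.Chars.isdigit then 4 else 5) else 5 := by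
  induction cs with
  | nil => rfl
  | cons c rest ih =>
    by_cases hd : PySem.Chars.isdigit c
    · simpa [List.foldl, pvStepA, hd, List.dropWhile_cons, ih] using ih
    · have hdot : PySem.Chars.isdigit '.' = false := by decide
      by_cases hc : c = '.'
      · subst hc; simp [List.foldl, pvStepA, hdot, List.dropWhile_cons, foldl4]
      · simp [List.foldl, pvStepA, hd, hc, List.dropWhile_cons, foldl5]

theorem lead_eq_takeWhile (cs : List Char) :
    pvLeadDigits cs = (cs.takeWhile PySem.Chars.isdigit).length := by
  induction cs with
  | nil => rfl
  | cons c rest ih =>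
    by_cases hd : PySem.Chars.isdigit c <;>
      simp [pvLeadDigits, hd, List.takeWhile_cons, ih]

theorem drop_lead (cs : List Char) :
    cs.drop (pvLeadDigits cs) = cs.dropWhile PySem.Chars.isdigit := by
  induction cs with
  | nil => rfl
  | cons c rest ih =>
    by_cases hd : PySem.Chars.isdigit c <;>
      simp [pvLeadDigits, hd, List.dropWhile_cons, ih]

theorem lead_le (cs : List Char) : pvLeadDigits cs ≤ cs.length := by
  rw [lead_eq_takeWhile]
  exact (List.takeWhile_sublist _).length_le

theorem str_eq_iff_toList (s : String) (t : String) : s = t ↔ s.toList = t.toList := by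
  constructor
  · intro h; rw [h]
  · intro h; exact String.ext (by simpa [String.ext_iff] using h)

-- B's answer computed directly from the character list
theorem alt_eval (s : String) :
    recognize_alt s =
      if s.toList = ['+'] then "SUMA"
      else if s.toList = ['+', '+'] then "INCR"
      else if PySem.Chars.strIsdigit s.toList then "ENTERO"
      else
        let cs := s.toList
        let i := pvLeadDigits cs
        if 0 < i ∧ i < cs.length ∧ cs[i]? = some '.' ∧
            (i + 1 = cs.length ∨ PySem.Chars.strIsdigit (cs.drop (i + 1))) then "REAL"
        else "ERROR" := by
  unfold recognize_alt
  rw [PySem.Str.strIsdigit_eq]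
  exact if_congr (str_eq_iff_toList s "+") rfl (if_congr (str_eq_iff_toList s "++") rfl rfl)

-- ===== VERDICT (by name: the statement is the Claim_ definition above) =====
theorem recognize_spec : Claim_equal_recognize := by
  intro s _
  show recognize s = recognize_alt s
  rw [alt_eval]
  unfold recognize
  cases hcs : s.toList with
  | nil => rfl
  | cons c rest =>
    by_cases hplus : c = '+'
    · subst hplus
      have h0 : (('+' :: rest).foldl pvStepA 0) = rest.foldl pvStepA 1 := by
        simp [List.foldl, pvStepA]
      rw [h0, foldl1]
      rcases rest with _ | ⟨d, r⟩
      · rfl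
      · by_cases hd : d = '+'
        · subst hd
          rcases r with _ | ⟨e, r'⟩
          · rfl
          · have hne : ('+' :: '+' :: e :: r') ≠ ['+'] := by simp
            have hne2 : ('+' :: '+' :: e :: r') ≠ ['+', '+'] := by simp
            have hdig : PySem.Chars.strIsdigit ('+' :: '+' :: e :: r') = false := by
              simp [PySem.Chars.strIsdigit, PySem.Chars.isdigit]
            have hlead : pvLeadDigits ('+' :: '+' :: e :: r') = 0 := by
              simp [pvLeadDigits, PySem.Chars.isdigit]
            simp [hne, hne2, hdig, hlead]; try rfl
        · have hne : (('+' :: d :: r) : List Char) ≠ ['+'] := by simp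
          have hne2 : (('+' :: d :: r) : List Char) ≠ ['+', '+'] := by simp [hd]
          have hdig : PySem.Chars.strIsdigit ('+' :: d :: r) = false := by
            simp [PySem.Chars.strIsdigit, PySem.Chars.isdigit]
          have hlead : pvLeadDigits ('+' :: d :: r) = 0 := by
            simp [pvLeadDigits, PySem.Chars.isdigit]
          simp [hne, hne2, hdig, hlead, hd]; try rfl
    · by_cases hdig : PySem.Chars.isdigit c
      · -- first char a digit: state 3, then foldl3
        have hplus' : PySem.Chars.isdigit '+' = false := by decide
        have hne : ((c :: rest) : List Char) ≠ ['+'] := by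
          intro h; rw [List.cons_eq_cons] at h; exact hplus h.1
        have hne2 : ((c :: rest) : List Char) ≠ ['+', '+'] := by
          intro h; rw [List.cons_eq_cons] at h; exact hplus h.1
        have h0 : ((c :: rest).foldl pvStepA 0) = rest.foldl pvStepA 3 := by
          simp [List.foldl, pvStepA, hplus, hdig]
        have hleadc : pvLeadDigits (c :: rest) = pvLeadDigits rest + 1 := by
          simp [pvLeadDigits, hdig]
        have hdropc : (c :: rest).dropWhile PySem.Chars.isdigit
            = rest.dropWhile PySem.Chars.isdigit := by
          simp [hdig]
        -- case on where the digits end in rest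
        cases hdw : rest.dropWhile PySem.Chars.isdigit with
        | nil =>
          -- all of rest are digits → ENTERO on both sides
          have hall : rest.all PySem.Chars.isdigit :=
            List.all_eq_true.mpr (by
              rw [List.dropWhile_eq_nil_iff] at hdw
              intro x hx; exact hdw x hx)
          have hsd : PySem.Chars.strIsdigit (c :: rest) = true := by
            simp [PySem.Chars.strIsdigit, hdig, hall]
          have hstate : List.foldl pvStepA 3 rest = 3 := by rw [foldl3, hdw]
          rw [h0, hstate, if_neg hne, if_neg hne2, if_pos hsd]
          rfl
        | cons e tl =>
          -- digits then a non-digit e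
          have hen : PySem.Chars.isdigit e = false := by
            have hne' : rest.dropWhile PySem.Chars.isdigit ≠ [] := by simp [hdw]
            have h := List.head_dropWhile_not (p := PySem.Chars.isdigit) (l := rest) hne'
            have h2 : (rest.dropWhile PySem.Chars.isdigit).head hne' = e := by simp [hdw]
            rwa [h2] at h
          have hsd : PySem.Chars.strIsdigit (c :: rest) = false := by
            by_contra hc
            have hall : ∀ x ∈ rest, PySem.Chars.isdigit x = true := by
              have := by simpa [PySem.Chars.strIsdigit] using hc
              exact fun x hx => this.2 x hx
            have : rest.dropWhile PySem.Chars.isdigit = [] := by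
              rw [List.dropWhile_eq_nil_iff]
              exact hall
            simp [hdw] at this
          have hlead_le' := lead_le rest
          have hdropr : rest.drop (pvLeadDigits rest) = e :: tl := by
            rw [drop_lead, hdw]
          have hilen : pvLeadDigits rest < rest.length := by
            by_contra hge
            rw [not_lt] at hge
            have : rest.drop (pvLeadDigits rest) = [] := List.drop_eq_nil_of_le hge
            rw [hdropr] at this; exact List.cons_ne_nil _ _ this
          have hgete : (c :: rest)[pvLeadDigits rest + 1]? = some e := by
            have : (c :: rest).drop (pvLeadDigits rest + 1) = e :: tl := by
              simpa [List.drop_succ_cons] using hdropr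
            rw [← List.head?_drop, this]; rfl
          have hdrop2 : (c :: rest).drop (pvLeadDigits rest + 1 + 1) = tl := by
            have h1 : (c :: rest).drop (pvLeadDigits rest + 1) = e :: tl := by
              simpa [List.drop_succ_cons] using hdropr
            have : (c :: rest).drop (pvLeadDigits rest + 1 + 1)
                = ((c :: rest).drop (pvLeadDigits rest + 1)).drop 1 := by
              rw [List.drop_drop]
            rw [this, h1]; rfl
          by_cases hdot : e = '.'
          · subst hdot
            -- A: state 4 branch; agreement depends on tl being all digits
            by_cases htl : tl.all PySem.Chars.isdigit
            · -- REAL on both sides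
              have hcond : 0 < pvLeadDigits (c :: rest) ∧
                  pvLeadDigits (c :: rest) < (c :: rest).length ∧
                  (c :: rest)[pvLeadDigits (c :: rest)]? = some '.' ∧
                  (pvLeadDigits (c :: rest) + 1 = (c :: rest).length ∨
                    PySem.Chars.strIsdigit ((c :: rest).drop (pvLeadDigits (c :: rest) + 1))) := by
                refine ⟨by omega, ?_, ?_, ?_⟩
                · simp [hleadc, List.length_cons]; omega
                · rw [hleadc]; exact hgete
                · rw [hleadc, hdrop2]
                  cases tl with
                  | nil =>
                    left
                    have : rest.length = pvLeadDigits rest + 1 := by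
                      have := congrArg List.length hdropr
                      simp at this; omega
                    simp [List.length_cons]; omega
                  | cons t ts =>
                    right
                    simp [PySem.Chars.strIsdigit]
                    exact List.forall_mem_cons.mp (List.all_eq_true.mp htl)
              have hstate : List.foldl pvStepA 3 rest = 4 := by
                rw [foldl3, hdw]; simp [htl]
              have h3 : ¬ (PySem.Chars.strIsdigit (c :: rest) = true) := by simp [hsd]
              rw [h0, hstate, if_neg hne, if_neg hne2, if_neg h3]
              refine Eq.trans ?_ (if_pos hcond).symm
              rfl
            · -- A gives 5 → ERROR; B: fourth condition fails
              have htl' : tl ≠ [] := by rintro rfl; simp at htl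
              have hcond : ¬ (0 < pvLeadDigits (c :: rest) ∧
                  pvLeadDigits (c :: rest) < (c :: rest).length ∧
                  (c :: rest)[pvLeadDigits (c :: rest)]? = some '.' ∧
                  (pvLeadDigits (c :: rest) + 1 = (c :: rest).length ∨
                    PySem.Chars.strIsdigit ((c :: rest).drop (pvLeadDigits (c :: rest) + 1)))) := by
                rintro ⟨-, -, -, hlast⟩
                rw [hleadc, hdrop2] at hlast
                rcases hlast with hlen | hsdt
                · have hl1 := congrArg List.length hdropr
                  simp at hl1
                  have hl2 : 0 < tl.length := List.length_pos_iff.mpr htl'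
                  simp [List.length_cons] at hlen
                  omega
                · have : tl.all PySem.Chars.isdigit = true := by
                    simpa [PySem.Chars.strIsdigit, htl'] using hsdt
                  exact htl (by simpa using this)
              have hstate : List.foldl pvStepA 3 rest = 5 := by
                rw [foldl3, hdw]; simp [htl]
              have h3 : ¬ (PySem.Chars.strIsdigit (c :: rest) = true) := by simp [hsd]
              rw [h0, hstate, if_neg hne, if_neg hne2, if_neg h3]
              refine Eq.trans ?_ (if_neg hcond).symm
              rfl
          · -- non-dot non-digit after digits: ERROR both sides
            have hcond : ¬ (0 < pvLeadDigits (c :: rest) ∧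
                pvLeadDigits (c :: rest) < (c :: rest).length ∧
                (c :: rest)[pvLeadDigits (c :: rest)]? = some '.' ∧
                (pvLeadDigits (c :: rest) + 1 = (c :: rest).length ∨
                  PySem.Chars.strIsdigit ((c :: rest).drop (pvLeadDigits (c :: rest) + 1)))) := by
              rintro ⟨-, -, hget, -⟩
              rw [hleadc, hgete] at hget
              exact hdot (by injection hget)
            have hstate : List.foldl pvStepA 3 rest = 5 := by
              rw [foldl3, hdw]; simp [hdot]
            have h3 : ¬ (PySem.Chars.strIsdigit (c :: rest) = true) := by simp [hsd]
            rw [h0, hstate, if_neg hne, if_neg hne2, if_neg h3]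
            refine Eq.trans ?_ (if_neg hcond).symm
            rfl
      · -- first char neither '+' nor digit: state 5 → ERROR both sides
        have h0 : ((c :: rest).foldl pvStepA 0) = rest.foldl pvStepA 5 := by
          simp [List.foldl, pvStepA, hplus, hdig]
        have hne : ((c :: rest) : List Char) ≠ ['+'] := by
          intro h; rw [List.cons_eq_cons] at h; exact hplus h.1
        have hne2 : ((c :: rest) : List Char) ≠ ['+', '+'] := by
          intro h; rw [List.cons_eq_cons] at h; exact hplus h.1
        have hsd : PySem.Chars.strIsdigit (c :: rest) = false := by
          simp [PySem.Chars.strIsdigit, hdig]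
        have hlead : pvLeadDigits (c :: rest) = 0 := by
          simp [pvLeadDigits, hdig]
        rw [h0, foldl5]
        simp [hne, hne2, hsd, hlead]; try rfl
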